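-- pv_equiv track=rewrite | github.com/Ryumkin/algorithms_part1 | week4/passwords.py | passwords
-- ===== SOURCE A (Python) =====
-- def voc_to_list(vocabulary):
--     """
--     produces a list lengths such that lengths[i] is the number of
--     words in length i in vocabulary
--     """
--     max_len = max([len(w) for w in vocabulary])
--     lengths = [0] * (max_len + 1)
--     for w in vocabulary:
--         lengths[len(w)] += 1
--     return lengths
--
-- def passwords(L, vocabulary):
--     lengths = voc_to_list(vocabulary)
--     k = len(lengths)
--     tbl = [0] * (L + 1)
--     for i in range(L + 1):
--         if i < k:
--             tbl[i] = lengths[i]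
--         for j in range(min(k, i)):
--             tbl[i] += lengths[j]
--     return tbl[L]
-- ===== SOURCE B (Python) =====
-- def passwords(L, vocabulary):
--     return sum(1 for w in vocabulary if len(w) <= L)
-- ===== Notes on version B (the rewrite author's own statement) =====
-- stated objective: faster
-- what changed: Replaced the O(L*k) table of prefix sums over length counts by a single pass counting the words of length <= L, which is exactly what tbl[L] equals.
import Mathlib
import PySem

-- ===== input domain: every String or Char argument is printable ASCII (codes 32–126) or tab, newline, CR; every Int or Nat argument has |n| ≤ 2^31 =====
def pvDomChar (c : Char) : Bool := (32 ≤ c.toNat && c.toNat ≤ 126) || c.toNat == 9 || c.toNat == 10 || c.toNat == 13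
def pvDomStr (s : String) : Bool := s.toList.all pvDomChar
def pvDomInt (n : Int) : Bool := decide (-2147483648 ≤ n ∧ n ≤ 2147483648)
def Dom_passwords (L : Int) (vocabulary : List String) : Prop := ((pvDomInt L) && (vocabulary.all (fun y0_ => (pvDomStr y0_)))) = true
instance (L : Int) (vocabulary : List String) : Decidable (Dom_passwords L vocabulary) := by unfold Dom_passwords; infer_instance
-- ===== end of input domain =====

-- B replaces A's O(L*k) prefix-sum table by a single counting pass (tbl[L] = number of words of length ≤ L);
-- equivalence is proved for nonempty vocabulary and L ≥ 0 (elsewhere A raises, see Pre_passwords).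

-- ===== PORT A =====
-- helper voc_to_list: lengths[i] = number of words of length i
def vocToList (vocabulary : List String) : List Int :=
  -- max([...]) raises ValueError on an empty vocabulary; Pre_ excludes it, the .getD 0 is never the value used
  let maxLen : Int := (PySem.List.max? (vocabulary.map (fun w => PySem.Str.len w)) (fun x => x)).getD 0
  let lengths : List Int := List.replicate (maxLen + 1).toNat 0
  vocabulary.foldl
    (fun lengths w =>
      PySem.List.pySetD lengths (PySem.Str.len w)
        (PySem.List.pyGetD lengths (PySem.Str.len w) 0 + 1))
    lengths

-- tbl is a Python list indexed/assigned at nonnegative in-range positions only (i, j from range);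
-- it is ported as Array Int for O(1) access; aGet/aSet are exact there (Python wraps/raises elsewhere)
def aGet (tbl : Array Int) (i : Int) : Int := tbl.getD i.toNat 0
def aSet (tbl : Array Int) (i : Int) (v : Int) : Array Int := tbl.setIfInBounds i.toNat v

-- body of one iteration of A's outer loop (i-th row): tbl[i] = lengths[i] if i < k, then the inner j-loop adds lengths[j]
def pwStep (lengths : List Int) (k : Int) (tbl : Array Int) (i : Int) : Array Int :=
  let tbl := if i < k then aSet tbl i (PySem.List.pyGetD lengths i 0) else tbl
  (PySem.List.pyRange 0 (min k i) 1).foldl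
    (fun tbl j => aSet tbl i (aGet tbl i + PySem.List.pyGetD lengths j 0))
    tbl

def passwords (L : Int) (vocabulary : List String) : Int :=
  let lengths := vocToList vocabulary
  let k : Int := PySem.List.len lengths
  let tbl : Array Int := Array.replicate (L + 1).toNat 0
  let tbl := (PySem.List.pyRange 0 (L + 1) 1).foldl (pwStep lengths k) tbl
  -- final tbl[L]: exact under Pre_ (0 ≤ L, so the index is in range; Python raises for L < 0)
  aGet tbl L

-- ===== PORT B =====
def passwords_alt (L : Int) (vocabulary : List String) : Int :=
  vocabulary.foldl (fun acc w => if PySem.Str.len w ≤ L then acc + 1 else acc) 0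

-- ===== PRECONDITION & SPEC =====
-- A raises ValueError on an empty vocabulary (max of an empty list) and IndexError for L < 0.
def Pre_passwords (L : Int) (vocabulary : List String) : Prop := vocabulary ≠ [] ∧ 0 ≤ L
instance (L : Int) (vocabulary : List String) : Decidable (Pre_passwords L vocabulary) := by
  unfold Pre_passwords; infer_instance
def pvWitness_passwords : Int × List String := (2, ["a", "bb", "ccc"])

def Spec_passwords (L : Int) (vocabulary : List String) (out : Int) : Prop := out = passwords_alt L vocabulary
instance (L : Int) (vocabulary : List String) (out : Int) : Decidable (Spec_passwords L vocabulary out) := by unfold Spec_passwords; infer_instance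

-- ===== CLAIM (what is proved, stated in full; the proofs are below) =====
def Claim_equal_passwords : Prop := ∀ (L : Int) (vocabulary : List String), Dom_passwords L vocabulary → Pre_passwords L vocabulary → Spec_passwords L vocabulary (passwords L vocabulary)

-- ===== LEMMAS AND PROOFS =====

-- the update performed by voc_to_list's loop
def vUpd (lens : List Int) (w : String) : List Int :=
  PySem.List.pySetD lens (PySem.Str.len w) (PySem.List.pyGetD lens (PySem.Str.len w) 0 + 1)

theorem str_len_nonneg (w : String) : 0 ≤ PySem.Str.len w := by
  rw [PySem.Str.len_eq]; exact Int.natCast_nonneg _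

theorem vUpd_length (lens : List Int) (w : String) : (vUpd lens w).length = lens.length := by
  simp [vUpd]

theorem vFold_length (ws : List String) (init : List Int) :
    (ws.foldl vUpd init).length = init.length := by
  induction ws generalizing init with
  | nil => rfl
  | cons w ws ih => simp [List.foldl_cons, ih, vUpd_length]

theorem vFold_getD (ws : List String) (init : List Int)
    (h : ∀ w ∈ ws, PySem.Str.len w < (init.length : Int)) (j : Nat) (hj : j < init.length) :
    (ws.foldl vUpd init).getD j 0
      = init.getD j 0 + (ws.countP (fun w => decide (PySem.Str.len w = (j : Int))) : Int) := by
  induction ws generalizing init with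
  | nil => simp
  | cons w ws ih =>
    have hw : PySem.Str.len w < (init.length : Int) := h w (by simp)
    obtain ⟨n, hn⟩ := Int.eq_ofNat_of_zero_le (str_len_nonneg w)
    have hnlen : n < init.length := by omega
    have hupd : vUpd init w = init.set n (init.getD n 0 + 1) := by
      unfold vUpd
      rw [hn, PySem.List.pySetD_natCast, PySem.List.pyGetD_natCast]
    rw [List.foldl_cons, ih (vUpd init w)
        (by intro w' hw'; rw [vUpd_length]; exact h w' (by simp [hw']))
        (by rw [vUpd_length]; exact hj)]
    rw [hupd, List.countP_cons]
    by_cases hje : j = n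
    · subst hje
      have hc : decide (PySem.Str.len w = (j : Int)) = true := by rw [hn]; simp
      rw [hc, List.getD_eq_getElem?_getD, List.getElem?_set_self hnlen,
        List.getD_eq_getElem?_getD, List.getElem?_eq_getElem hnlen]
      simp only [Option.getD_some, if_true]
      push_cast; ring
    · have hc : decide (PySem.Str.len w = (j : Int)) = false := by
        rw [hn]; simp; omega
      rw [hc, List.getD_eq_getElem?_getD, List.getElem?_set_ne (by omega),
        ← List.getD_eq_getElem?_getD]
      simp

theorem vocToList_spec (v : List String) (hv : v ≠ []) :
    (∀ w ∈ v, PySem.Str.len w < ((vocToList v).length : Int)) ∧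
    ∀ j : Nat, j < (vocToList v).length →
      (vocToList v).getD j 0 = (v.countP (fun w => decide (PySem.Str.len w = (j : Int))) : Int) := by
  obtain ⟨m, hm⟩ : ∃ m, PySem.List.max? (v.map (fun w => PySem.Str.len w)) (fun x => x) = some m := by
    cases hmo : PySem.List.max? (v.map (fun w => PySem.Str.len w)) (fun x => x) with
    | none => exact absurd ((PySem.List.max?_eq_none_iff _ _).1 hmo) (by simp [hv])
    | some m => exact ⟨m, rfl⟩
  have hm0 : 0 ≤ m := by
    have hmem := PySem.List.max?_mem hm
    obtain ⟨w, -, rfl⟩ := List.mem_map.1 hmem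
    exact str_len_nonneg w
  have hveq : vocToList v = v.foldl vUpd (List.replicate (m + 1).toNat 0) := by
    unfold vocToList vUpd; rw [hm]; rfl
  have hlen : (vocToList v).length = (m + 1).toNat := by
    rw [hveq, vFold_length]; simp
  have hbound : ∀ w ∈ v, PySem.Str.len w < ((vocToList v).length : Int) := by
    intro w hw
    have hle : PySem.Str.len w ≤ m := PySem.List.max?_isMax hm _ (List.mem_map_of_mem hw)
    rw [hlen]; omega
  refine ⟨hbound, fun j hj => ?_⟩
  have hinit : ∀ w ∈ v, PySem.Str.len w < ((List.replicate (m + 1).toNat (0:Int)).length : Int) := by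
    intro w hw
    have := hbound w hw
    simpa [hlen] using this
  rw [hveq, vFold_getD _ _ hinit j (by simpa [hlen] using hj),
    List.getD_replicate _ (by simpa [hlen] using hj)]
  simp

theorem aSet_size (tbl : Array Int) (i : Int) (v : Int) : (aSet tbl i v).size = tbl.size :=
  Array.size_setIfInBounds

theorem aGet_aSet_self (tbl : Array Int) (i : Int) (v : Int) (h : i.toNat < tbl.size) :
    aGet (aSet tbl i v) i = v := by
  simp [aGet, aSet, Array.getD_eq_getD_getElem?, Array.getElem?_setIfInBounds, h]

theorem getD_aSet_ne (tbl : Array Int) (i : Int) (v : Int) (m : Nat) (h : m ≠ i.toNat) :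
    (aSet tbl i v).getD m 0 = tbl.getD m 0 := by
  simp [aSet, Array.getD_eq_getD_getElem?, Array.getElem?_setIfInBounds, Ne.symm h]

-- the update performed by the inner j-loop of A's table
def iUpd (lens : List Int) (i : Int) (tbl : Array Int) (j : Int) : Array Int :=
  aSet tbl i (aGet tbl i + PySem.List.pyGetD lens j 0)

theorem pwStep_eq (lens : List Int) (k : Int) (tbl : Array Int) (i : Int) :
    pwStep lens k tbl i = (PySem.List.pyRange 0 (min k i)).foldl (iUpd lens i)
      (if i < k then aSet tbl i (PySem.List.pyGetD lens i 0) else tbl) := rfl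

theorem iFold_size (lens : List Int) (i : Int) (js : List Int) (tbl : Array Int) :
    (js.foldl (iUpd lens i) tbl).size = tbl.size := by
  induction js generalizing tbl with
  | nil => rfl
  | cons j js ih => simp [List.foldl_cons, ih, iUpd, aSet_size]

theorem iFold_getD_self (lens : List Int) (i : Int) (hi0 : 0 ≤ i) (js : List Int)
    (tbl : Array Int) (hi : i < (tbl.size : Int)) :
    aGet (js.foldl (iUpd lens i) tbl) i
      = aGet tbl i + (js.map (fun j => PySem.List.pyGetD lens j 0)).sum := by
  induction js generalizing tbl with
  | nil => simp
  | cons j js ih =>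
    have hlt : i.toNat < tbl.size := by omega
    rw [List.foldl_cons, ih (iUpd lens i tbl j) (by rw [iUpd, aSet_size]; exact hi), iUpd,
      aGet_aSet_self _ _ _ hlt]
    simp
    ring

theorem iFold_getD_ne (lens : List Int) (i : Int) (m : Nat) (hm : m ≠ i.toNat)
    (js : List Int) (tbl : Array Int) :
    (js.foldl (iUpd lens i) tbl).getD m 0 = tbl.getD m 0 := by
  induction js generalizing tbl with
  | nil => rfl
  | cons j js ih => rw [List.foldl_cons, ih, iUpd, getD_aSet_ne _ _ _ _ hm]

theorem pwStep_size (lens : List Int) (k : Int) (tbl : Array Int) (i : Int) :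
    (pwStep lens k tbl i).size = tbl.size := by
  rw [pwStep_eq, iFold_size]
  split <;> simp [aSet_size]

theorem pwStep_getD_ne (lens : List Int) (k : Int) (tbl : Array Int) (i : Int)
    (m : Nat) (hm : m ≠ i.toNat) :
    (pwStep lens k tbl i).getD m 0 = tbl.getD m 0 := by
  rw [pwStep_eq, iFold_getD_ne lens i m hm]
  split
  · rw [getD_aSet_ne _ _ _ _ hm]
  · rfl

-- the value A's loop stores in tbl[i]
def cell (lens : List Int) (k i : Int) : Int :=
  (if i < k then PySem.List.pyGetD lens i 0 else 0)
    + ((PySem.List.pyRange 0 (min k i)).map (fun j => PySem.List.pyGetD lens j 0)).sum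

theorem pwStep_getD_self (lens : List Int) (k : Int) (tbl : Array Int) (i : Int) (hi0 : 0 ≤ i)
    (hi : i < (tbl.size : Int)) (h0 : aGet tbl i = 0) :
    aGet (pwStep lens k tbl i) i = cell lens k i := by
  have hlt : i.toNat < tbl.size := by omega
  rw [pwStep_eq, cell]
  split
  · rw [iFold_getD_self lens i hi0 _ _ (by rw [aSet_size]; exact hi),
      aGet_aSet_self _ _ _ hlt]
  · rw [iFold_getD_self lens i hi0 _ _ hi, h0]

theorem outer_size (lens : List Int) (k : Int) (rs : List Int) (tbl : Array Int) :
    (rs.foldl (pwStep lens k) tbl).size = tbl.size := by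
  induction rs generalizing tbl with
  | nil => rfl
  | cons r rs ih => rw [List.foldl_cons, ih, pwStep_size]

theorem outer_getD (lens : List Int) (k : Int) (len0 : Nat) (n : Nat) (hn : n ≤ len0)
    (m : Nat) (hm : m < len0) :
    ((PySem.List.pyRange 0 (n : Int)).foldl (pwStep lens k) (Array.replicate len0 (0:Int))).getD m 0
      = if (m : Int) < (n : Int) then cell lens k (m : Int) else 0 := by
  induction n with
  | zero =>
    rw [PySem.List.pyRange_one_eq_nil (by simp), List.foldl_nil]
    simp [Array.getD_eq_getD_getElem?, Array.getElem?_replicate, hm]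
  | succ n ih =>
    have hcast : ((n + 1 : Nat) : Int) = (n : Int) + 1 := by push_cast; ring
    rw [hcast, PySem.List.pyRange_one_succ_right (by positivity), List.foldl_append]
    have hF := ih (by omega)
    by_cases hmn : m = n
    · subst hmn
      have hsize : ((PySem.List.pyRange 0 (m : Int)).foldl (pwStep lens k)
          (Array.replicate len0 (0:Int))).size = len0 := by
        rw [outer_size]; simp
      rw [List.foldl_cons, List.foldl_nil]
      have hself := pwStep_getD_self lens k _ (m : Int) (by positivity)
        (by rw [hsize]; exact_mod_cast hm)
        (by rw [aGet, Int.toNat_natCast, hF]; simp)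
      rw [aGet, Int.toNat_natCast] at hself
      rw [hself]
      simp
    · rw [List.foldl_cons, List.foldl_nil,
        pwStep_getD_ne lens k _ (n : Int) m (by omega), hF]
      have hmn' : (m : Int) ≠ (n : Int) := by exact_mod_cast hmn
      split_ifs <;> first | rfl | omega

theorem passwords_def (L : Int) (v : List String) :
    passwords L v = aGet
      ((PySem.List.pyRange 0 (L + 1)).foldl
        (pwStep (vocToList v) (PySem.List.len (vocToList v)))
        (Array.replicate (L + 1).toNat 0)) L := rfl

theorem passwords_closed (L : Int) (v : List String) (hL : 0 ≤ L) :
    passwords L v = cell (vocToList v) ((vocToList v).length : Int) L := by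
  rw [passwords_def]
  have hk : PySem.List.len (vocToList v) = ((vocToList v).length : Int) := by
    simp [PySem.List.len_eq]
  have hlen : ((L + 1).toNat) = L.toNat + 1 := by omega
  rw [hk, hlen]
  have houter := outer_getD (vocToList v) ((vocToList v).length : Int)
    (L.toNat + 1) (L.toNat + 1) (le_refl _) L.toNat (by omega)
  have hcast : ((L.toNat + 1 : Nat) : Int) = L + 1 := by omega
  rw [hcast, if_pos (by omega), Int.toNat_of_nonneg hL] at houter
  rw [aGet, houter]

theorem countP_lt_succ (v : List String) (m : Int) :
    v.countP (fun w => decide (PySem.Str.len w < m + 1)) =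
      v.countP (fun w => decide (PySem.Str.len w < m))
        + v.countP (fun w => decide (PySem.Str.len w = m)) := by
  induction v with
  | nil => simp
  | cons w ws ih =>
    simp only [List.countP_cons, ih, decide_eq_true_eq]
    split_ifs <;> omega

theorem sum_range_cnt (v : List String) (hv : v ≠ []) (m : Nat)
    (hm : m ≤ (vocToList v).length) :
    ((PySem.List.pyRange 0 (m : Int)).map (fun j => PySem.List.pyGetD (vocToList v) j 0)).sum
      = (v.countP (fun w => decide (PySem.Str.len w < (m : Int))) : Int) := by
  induction m with
  | zero =>
    rw [PySem.List.pyRange_one_eq_nil (by simp)]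
    have hz : v.countP (fun w => decide (PySem.Str.len w < (0 : Int))) = 0 := by
      rw [List.countP_eq_zero]
      intro w _
      have := str_len_nonneg w
      simp only [decide_eq_true_eq]
      omega
    simp only [List.map_nil, List.sum_nil, Nat.cast_zero]
    rw [hz]
    simp
  | succ m ih =>
    have hcast : ((m + 1 : Nat) : Int) = (m : Int) + 1 := by push_cast; ring
    rw [hcast, PySem.List.pyRange_one_succ_right (by positivity), List.map_append,
      List.sum_append, ih (by omega)]
    have hget : PySem.List.pyGetD (vocToList v) (m : Int) 0
        = (v.countP (fun w => decide (PySem.Str.len w = (m : Int))) : Int) := by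
      rw [PySem.List.pyGetD_natCast]
      exact (vocToList_spec v hv).2 m (by omega)
    rw [countP_lt_succ v (m : Int)]
    simp [hget]

theorem passwords_eq_alt (L : Int) (v : List String) (hv : v ≠ []) (hL : 0 ≤ L) :
    passwords L v = passwords_alt L v := by
  have halt : passwords_alt L v = (v.countP (fun w => decide (PySem.Str.len w ≤ L)) : Int) := by
    unfold passwords_alt
    rw [PySem.List.foldl_ite_add_one (fun w => PySem.Str.len w ≤ L) v 0]
    simp
  obtain ⟨hbound, hgetD⟩ := vocToList_spec v hv
  rw [passwords_closed L v hL, halt, cell]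
  by_cases hLk : L < ((vocToList v).length : Int)
  · rw [min_eq_right (le_of_lt hLk), if_pos hLk]
    have hL1 : L = ((L.toNat : Nat) : Int) := by omega
    have hget : PySem.List.pyGetD (vocToList v) L 0
        = (v.countP (fun w => decide (PySem.Str.len w = L)) : Int) := by
      conv_lhs => rw [hL1]
      rw [PySem.List.pyGetD_natCast, hgetD L.toNat (by omega), ← hL1]
    have hsum := sum_range_cnt v hv L.toNat (by omega)
    rw [← hL1] at hsum
    rw [hget, hsum]
    have hle : v.countP (fun w => decide (PySem.Str.len w ≤ L))
        = v.countP (fun w => decide (PySem.Str.len w < L + 1)) := by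
      apply List.countP_congr
      intro w _
      simp only [decide_eq_true_eq]
      omega
    rw [hle, countP_lt_succ v L]
    push_cast; ring
  · rw [min_eq_left (not_lt.1 hLk), if_neg hLk]
    have hsum := sum_range_cnt v hv (vocToList v).length (le_refl _)
    rw [hsum]
    have hcongr : v.countP (fun w => decide (PySem.Str.len w < ((vocToList v).length : Int)))
        = v.countP (fun w => decide (PySem.Str.len w ≤ L)) := by
      apply List.countP_congr
      intro w hw
      have h1 := hbound w hw
      have h2 := not_lt.1 hLk
      simp only [decide_eq_true_eq]
      omega
    rw [hcongr]
    ring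

-- ===== VERDICT (by name: the statement is the Claim_ definition above) =====
theorem passwords_spec : Claim_equal_passwords := by
  intro L v _ hp
  unfold Spec_passwords
  exact passwords_eq_alt L v hp.1 hp.2
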